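-- pv_equiv track=rewrite | github.com/sbyeol3/Algorithm-Study | Python-code/Programmers/hashLv3-1.py | solution
-- ===== SOURCE A (Python) =====
-- from collections import defaultdict
--
-- def solution(genres, plays):
--   length = len(genres)
--   answer = []
--   dictGP = dict()
--   dictGenres = defaultdict(list)
--
--   for g, p in zip(genres, plays):
--     if hash(g) in dictGP : dictGP[hash(g)] += p
--     else : dictGP[hash(g)] = p
--
--   for i in range(length):
--     hashG = hash(genres[i])
--     if len(dictGenres[hashG])==2 :
--       if plays[i] > plays[dictGenres[hashG][0]] :
--         tmp = dictGenres[hashG][0]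
--         dictGenres[hashG][0] = i
--         dictGenres[hashG][1] = tmp
--       elif plays[i] > plays[dictGenres[hashG][1]] : dictGenres[hashG][1] = i
--     elif len(dictGenres[hashG])==1 :
--       if plays[i] > plays[dictGenres[hashG][0]] :
--         tmp = dictGenres[hashG][0]
--         dictGenres[hashG][0] = i
--         dictGenres[hashG].append(tmp)
--       else : dictGenres[hashG].append(i)
--     else :
--       dictGenres[hashG].append(i)
--
--   sDictGP = sorted(dictGP.items(), key=lambda x: x[1], reverse=True)
--   for i in sDictGP:
--     answer.append(dictGenres[i[0]][0])
--     answer.append(dictGenres[i[0]][1])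
--   return answer
-- ===== SOURCE B (Python) =====
-- def solution(genres, plays):
--     totals = {}
--     byGenre = {}
--     for i, g in enumerate(genres):
--         totals[g] = totals.get(g, 0) + plays[i]
--         byGenre.setdefault(g, []).append(i)
--     answer = []
--     for g, _total in sorted(totals.items(), key=lambda kv: kv[1], reverse=True):
--         top = sorted(byGenre[g], key=lambda i: -plays[i])
--         answer.append(top[0])
--         answer.append(top[1])
--     return answer
-- ===== Notes on version B (the rewrite author's own statement) =====
-- stated objective: simpler
-- what changed: A's hand-maintained top-2-per-genre conditional cascade over three passes is replaced by one grouping pass (genre -> total and index list) followed by a stable per-genre sort by descending plays, reading the top two entries directly.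
-- outside the precondition, e.g. on solution(['b9', 'by0 y91yax', '0x9zc001c'], []): A returns [], B raises IndexError
import Mathlib
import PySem

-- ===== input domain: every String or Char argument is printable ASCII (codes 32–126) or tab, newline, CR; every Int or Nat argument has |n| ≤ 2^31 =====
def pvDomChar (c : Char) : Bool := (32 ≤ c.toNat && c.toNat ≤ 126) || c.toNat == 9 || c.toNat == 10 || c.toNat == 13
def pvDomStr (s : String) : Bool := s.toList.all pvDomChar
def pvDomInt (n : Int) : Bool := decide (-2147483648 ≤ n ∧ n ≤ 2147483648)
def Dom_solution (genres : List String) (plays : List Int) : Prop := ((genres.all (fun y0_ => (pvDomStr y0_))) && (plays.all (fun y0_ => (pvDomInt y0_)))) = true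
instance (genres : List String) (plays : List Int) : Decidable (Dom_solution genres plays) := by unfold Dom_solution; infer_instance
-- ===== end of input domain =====

-- B replaces A's hand-maintained top-2-per-genre conditional cascade by one grouping pass plus a
-- stable per-genre sort by descending plays (objective: simpler).


-- ===== PORT A =====
-- the body of A's second loop: the top-2 list for genre hashG, updated with track i
def astepA (plays : List Int) (cur : List Int) (i : Int) : List Int :=
  if cur.length == 2 then
    if PySem.List.pyGetD plays i 0 > PySem.List.pyGetD plays (PySem.List.pyGetD cur 0 0) 0 then
      [i, PySem.List.pyGetD cur 0 0]
    else if PySem.List.pyGetD plays i 0 > PySem.List.pyGetD plays (PySem.List.pyGetD cur 1 0) 0 then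
      [PySem.List.pyGetD cur 0 0, i]
    else cur
  else if cur.length == 1 then
    if PySem.List.pyGetD plays i 0 > PySem.List.pyGetD plays (PySem.List.pyGetD cur 0 0) 0 then
      [i, PySem.List.pyGetD cur 0 0]
    else cur ++ [i]
  else cur ++ [i]

def solution (genres : List String) (plays : List Int) : List Int :=
  let length := PySem.List.len genres
  let dictGP : PySem.Dict String Int := (genres.zip plays).foldl
    (fun d gp => if d.contains gp.1 then d.insert gp.1 (d.getD gp.1 0 + gp.2)
                 else d.insert gp.1 gp.2) PySem.Dict.empty
  let dictGenres : PySem.Dict String (List Int) := (PySem.List.pyRange 0 length 1).foldl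
    (fun d i =>
      let hashG := PySem.List.pyGetD genres i ""
      d.insert hashG (astepA plays (d.getD hashG []) i)) PySem.Dict.empty
  let sDictGP := PySem.List.sorted dictGP.items (fun x => x.2) true
  sDictGP.foldl (fun answer i =>
    (answer ++ [PySem.List.pyGetD (dictGenres.getD i.1 []) 0 0])
      ++ [PySem.List.pyGetD (dictGenres.getD i.1 []) 1 0]) []

-- ===== PORT B =====
def solution_alt (genres : List String) (plays : List Int) : List Int :=
  let tb := (PySem.List.enumerate genres).foldl
    (fun s p => (s.1.insert p.2 (s.1.getD p.2 0 + PySem.List.pyGetD plays p.1 0),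
                 s.2.insert p.2 (s.2.getD p.2 [] ++ [p.1])))
    ((PySem.Dict.empty : PySem.Dict String Int), (PySem.Dict.empty : PySem.Dict String (List Int)))
  (PySem.List.sorted tb.1.items (fun kv => kv.2) true).foldl
    (fun answer gt =>
      let top := PySem.List.sorted (tb.2.getD gt.1 []) (fun i => -(PySem.List.pyGetD plays i 0)) false
      (answer ++ [PySem.List.pyGetD top 0 0]) ++ [PySem.List.pyGetD top 1 0]) []

-- ===== PRECONDITION & SPEC =====
-- Pre_ excludes inputs where A raises IndexError (plays not covering a genre index it reads, or a
-- genre with fewer than 2 tracks) and the degenerate short-plays inputs on which A still returns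
-- (with no repeated genre A never reads the missing plays) but B itself raises IndexError.
def Pre_solution (genres : List String) (plays : List Int) : Prop :=
  genres.length ≤ plays.length ∧ ∀ g ∈ genres, 2 ≤ genres.count g
instance (genres : List String) (plays : List Int) : Decidable (Pre_solution genres plays) := by unfold Pre_solution; infer_instance
def pvWitness_solution : List String × List Int := (["a", "a"], [1, 2])

def Spec_solution (genres : List String) (plays : List Int) (out : List Int) : Prop := out = solution_alt genres plays
instance (genres : List String) (plays : List Int) (out : List Int) : Decidable (Spec_solution genres plays out) := by unfold Spec_solution; infer_instance

-- ===== CLAIM (what is proved, stated in full; the proofs are below) =====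
def Claim_equal_solution : Prop := ∀ (genres : List String) (plays : List Int), Dom_solution genres plays → Pre_solution genres plays → Spec_solution genres plays (solution genres plays)

-- ===== LEMMAS AND PROOFS =====

-- zip(genres, plays) as a map over enumerate(genres), valid when plays covers genres
lemma zip_eq_enum_map (genres : List String) (plays : List Int) (h : genres.length ≤ plays.length) :
    genres.zip plays
      = (PySem.List.enumerate genres).map (fun p => (p.2, PySem.List.pyGetD plays p.1 0)) := by
  apply List.ext_getElem
  · simp [PySem.List.length_enumerate]; omega
  · intro k h1 h2
    have hk : k < plays.length := by simp at h1; omega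
    have hkg : k < genres.length := by simp at h1; omega
    simp [List.getElem_zip, PySem.List.getElem_enumerate,
      PySem.List.pyGetD_natCast, List.getElem?_eq_getElem hk]

-- lookup after a fold that rewrites one key per element: only the matching elements act
lemma getD_keyfold (upd : List Int → Int → List Int) (g : String) :
    ∀ (l : List (Int × String)) (d : PySem.Dict String (List Int)),
    (l.foldl (fun d p => d.insert p.2 (upd (d.getD p.2 []) p.1)) d).getD g []
      = (l.filter (fun p => p.2 == g)).foldl (fun cur p => upd cur p.1) (d.getD g []) := by
  intro l
  induction l with
  | nil => intro d; rfl
  | cons p t ih =>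
    intro d
    simp only [List.foldl_cons, List.filter_cons]
    by_cases hg : p.2 = g
    · simp [hg, ih]
    · simp [hg, ih, PySem.Dict.getD_insert, Ne.symm hg]

-- the first two of an insertion equal A's top-2 update of the first two
lemma astep_insertBy (plays : List Int) (S : List Int) (i : Int) :
    astepA plays (S.take 2) i
      = (PySem.List.insertBy
          (fun a b => decide ((-(PySem.List.pyGetD plays a 0)) < -(PySem.List.pyGetD plays b 0)))
          i S).take 2 := by
  have g1 : ∀ x y : Int, PySem.List.pyGetD [x, y] (1 : Int) 0 = y := by
    intro x y; simp [PySem.List.pyGetD]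
  match S with
  | [] => simp [astepA, PySem.List.insertBy]
  | [a] =>
    by_cases h1 : PySem.List.pyGetD plays a 0 < PySem.List.pyGetD plays i 0 <;>
      simp [astepA, PySem.List.insertBy, PySem.List.pyGetD_zero_cons, h1, neg_lt_neg_iff]
  | a :: b :: t =>
    by_cases h1 : PySem.List.pyGetD plays a 0 < PySem.List.pyGetD plays i 0 <;>
    by_cases h2 : PySem.List.pyGetD plays b 0 < PySem.List.pyGetD plays i 0 <;>
      simp [astepA, PySem.List.insertBy, PySem.List.pyGetD_zero_cons, g1, h1, h2,
        neg_lt_neg_iff]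

-- A's maintained top-2 list IS the first two of B's stable descending sort
lemma top2_eq (plays : List Int) (idxs : List Int) :
    idxs.foldl (astepA plays) []
      = (PySem.List.sorted idxs (fun i => -(PySem.List.pyGetD plays i 0)) false).take 2 := by
  induction idxs using List.reverseRecOn with
  | nil => rfl
  | append_singleton l i ih =>
    rw [List.foldl_append, List.foldl_cons, List.foldl_nil, ih,
      PySem.List.sorted_eq_foldl_insertBy (l ++ [i]), List.foldl_append, List.foldl_cons,
      List.foldl_nil, ← PySem.List.sorted_eq_foldl_insertBy l]
    exact astep_insertBy plays _ i

lemma pyGetD_take_two (xs : List Int) :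
    PySem.List.pyGetD (xs.take 2) (0 : Int) 0 = PySem.List.pyGetD xs 0 0
      ∧ PySem.List.pyGetD (xs.take 2) (1 : Int) 0 = PySem.List.pyGetD xs 1 0 := by
  match xs with
  | [] => exact ⟨rfl, rfl⟩
  | [a] => exact ⟨rfl, rfl⟩
  | a :: b :: t => constructor <;> simp [pysem]

-- ===== VERDICT (by name: the statement is the Claim_ definition above) =====
theorem solution_spec : Claim_equal_solution := by
  intro genres plays _hdom hpre
  unfold Spec_solution
  simp only [solution, solution_alt]
  have hP : (PySem.List.enumerate genres).foldl
      (fun s p => (s.1.insert p.2 (s.1.getD p.2 0 + PySem.List.pyGetD plays p.1 0),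
                   s.2.insert p.2 (s.2.getD p.2 [] ++ [p.1])))
      ((PySem.Dict.empty : PySem.Dict String Int), (PySem.Dict.empty : PySem.Dict String (List Int)))
      = ((PySem.List.enumerate genres).foldl
          (fun d p => d.insert p.2 (d.getD p.2 0 + PySem.List.pyGetD plays p.1 0)) PySem.Dict.empty,
         (PySem.List.enumerate genres).foldl
          (fun d p => d.insert p.2 (d.getD p.2 [] ++ [p.1])) PySem.Dict.empty) :=
    PySem.List.foldl_prod_mk
      (fun d p => d.insert p.2 (d.getD p.2 0 + PySem.List.pyGetD plays p.1 0))
      (fun d p => d.insert p.2 (d.getD p.2 [] ++ [p.1]))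
      (PySem.List.enumerate genres) PySem.Dict.empty PySem.Dict.empty
  simp only [hP]
  -- totals dict of B = dictGP of A
  have hT : (genres.zip plays).foldl
      (fun d gp => if d.contains gp.1 then d.insert gp.1 (d.getD gp.1 0 + gp.2)
                   else d.insert gp.1 gp.2) PySem.Dict.empty
      = (PySem.List.enumerate genres).foldl
        (fun d p => d.insert p.2 (d.getD p.2 0 + PySem.List.pyGetD plays p.1 0))
        PySem.Dict.empty := by
    rw [zip_eq_enum_map genres plays hpre.1, List.foldl_map]
    have hstep : (fun (d : PySem.Dict String Int) (p : Int × String) =>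
        if d.contains p.2 then d.insert p.2 (d.getD p.2 0 + PySem.List.pyGetD plays p.1 0)
        else d.insert p.2 (PySem.List.pyGetD plays p.1 0))
        = (fun d p => d.insert p.2 (d.getD p.2 0 + PySem.List.pyGetD plays p.1 0)) := by
      funext d p
      by_cases hc : d.contains p.2
      · simp [hc]
      · rw [if_neg hc, PySem.Dict.getD_of_not_contains d 0 (by simpa using hc), zero_add]
    rw [hstep]
  rw [hT]
  -- per-genre buckets: A's top-2 = take 2 of sorted of B's index list
  have hbucket : ∀ g : String,
      ((PySem.List.pyRange 0 (PySem.List.len genres) 1).foldl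
        (fun d i =>
          let hashG := PySem.List.pyGetD genres i ""
          d.insert hashG (astepA plays (d.getD hashG []) i))
        (PySem.Dict.empty : PySem.Dict String (List Int))).getD g []
      = (((PySem.List.enumerate genres).foldl
          (fun d p => d.insert p.2 (d.getD p.2 [] ++ [p.1]))
          (PySem.Dict.empty : PySem.Dict String (List Int))).getD g []).foldl
        (astepA plays) [] := by
    intro g
    have hA : (PySem.List.pyRange 0 (PySem.List.len genres) 1).foldl
        (fun d i =>
          let hashG := PySem.List.pyGetD genres i ""
          d.insert hashG (astepA plays (d.getD hashG []) i))
        (PySem.Dict.empty : PySem.Dict String (List Int))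
        = (PySem.List.enumerate genres).foldl
          (fun d p => d.insert p.2 (astepA plays (d.getD p.2 []) p.1)) PySem.Dict.empty := by
      rw [PySem.List.enumerate_eq_map_pyRange genres "", List.foldl_map]
    rw [hA, getD_keyfold (astepA plays) g, getD_keyfold (fun cur i => cur ++ [i]) g]
    simp only [PySem.Dict.getD_empty]
    rw [PySem.List.foldl_append_singleton_eq_map (fun p : Int × String => p.1) _ [],
      List.nil_append,
      ← List.foldl_map (f := fun p : Int × String => p.1) (g := astepA plays)]
  -- the two output folds agree pointwise
  have hfun : (fun (answer : List Int) (i : (String × Int)) =>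
      (answer ++ [PySem.List.pyGetD
        (((PySem.List.pyRange 0 (PySem.List.len genres) 1).foldl
          (fun d i =>
            let hashG := PySem.List.pyGetD genres i ""
            d.insert hashG (astepA plays (d.getD hashG []) i))
          (PySem.Dict.empty : PySem.Dict String (List Int))).getD i.1 []) 0 0])
        ++ [PySem.List.pyGetD
        (((PySem.List.pyRange 0 (PySem.List.len genres) 1).foldl
          (fun d i =>
            let hashG := PySem.List.pyGetD genres i ""
            d.insert hashG (astepA plays (d.getD hashG []) i))
          (PySem.Dict.empty : PySem.Dict String (List Int))).getD i.1 []) 1 0])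
      = (fun answer gt =>
        let top := PySem.List.sorted
          (((PySem.List.enumerate genres).foldl
            (fun d p => d.insert p.2 (d.getD p.2 [] ++ [p.1]))
            (PySem.Dict.empty : PySem.Dict String (List Int))).getD gt.1 [])
          (fun i => -(PySem.List.pyGetD plays i 0)) false
        (answer ++ [PySem.List.pyGetD top 0 0]) ++ [PySem.List.pyGetD top 1 0]) := by
    funext answer gt
    rw [hbucket gt.1, top2_eq]
    rw [(pyGetD_take_two _).1, (pyGetD_take_two _).2]
  rw [hfun]
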